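-- pv_equiv track=rewrite | github.com/abhinav-e-p-b/Automatic-License-Plate-Recognition | util.py | correct_ocr_errors
-- ===== SOURCE A (Python) =====
-- dict_char_to_int = {
--     'O': '0', 'I': '1', 'Z': '2', 'J': '3',
--     'A': '4', 'G': '6', 'S': '5', 'B': '8'
-- }
--
-- dict_int_to_char = {
--     '0': 'O', '1': 'I', '2': 'Z', '3': 'J',
--     '4': 'A', '6': 'G', '5': 'S', '8': 'B'
-- }
--
-- def correct_ocr_errors(text):
--     """
--     Correct common OCR misreads for Indian plates.
--     Positions: [0-1]=state letters, [2-3]=district digits, [4-6]=series letters, [7-10]=number digits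
--     """
--     corrected = list(text)
--     n = len(text)
--
--     for i, ch in enumerate(corrected):
--         if i < 2:
--             # State code: must be letters
--             if ch in dict_char_to_int:
--                 corrected[i] = dict_char_to_int[ch]  # Keep as is — wait, need letters
--             # Actually convert digit-lookalikes to letters
--             if ch in dict_int_to_char:
--                 corrected[i] = dict_int_to_char[ch]
--         elif i < 4:
--             # District: must be digits
--             if ch in dict_char_to_int:
--                 corrected[i] = dict_char_to_int[ch]
--         elif i < n - 4:
--             # Series letters: must be letters
--             if ch in dict_int_to_char:
--                 corrected[i] = dict_int_to_char[ch]
--         else: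
--             # Serial number: must be digits
--             if ch in dict_char_to_int:
--                 corrected[i] = dict_char_to_int[ch]
--
--     return ''.join(corrected)
-- ===== SOURCE B (Python) =====
-- dict_char_to_int = {
--     'O': '0', 'I': '1', 'Z': '2', 'J': '3',
--     'A': '4', 'G': '6', 'S': '5', 'B': '8'
-- }
--
-- dict_int_to_char = {
--     '0': 'O', '1': 'I', '2': 'Z', '3': 'J',
--     '4': 'A', '6': 'G', '5': 'S', '8': 'B'
-- }
--
-- # merged table for the state segment: keys are disjoint, letter->digit entries
-- # shadowed-then-overwritten in A collapse to this single lookup table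
-- _state_tbl = str.maketrans({**dict_int_to_char, **dict_char_to_int})
-- _to_int_tbl = str.maketrans(dict_char_to_int)
-- _to_char_tbl = str.maketrans(dict_int_to_char)
--
-- def correct_ocr_errors(text):
--     n = len(text)
--     k = max(4, n - 4)
--     return (text[0:2].translate(_state_tbl)
--             + text[2:4].translate(_to_int_tbl)
--             + text[4:k].translate(_to_char_tbl)
--             + text[k:].translate(_to_int_tbl))
-- ===== Notes on version B (the rewrite author's own statement) =====
-- stated objective: simpler
-- what changed: Replaces the per-character index-branched mutation loop by slicing the plate into its four positional segments with explicit boundaries (clamping n-4 at 4) and batch-translating each slice with a precomputed str.maketrans table, the state segment using the merged letter/digit table that A's double-assignment quirk amounts to.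
import Mathlib
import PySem

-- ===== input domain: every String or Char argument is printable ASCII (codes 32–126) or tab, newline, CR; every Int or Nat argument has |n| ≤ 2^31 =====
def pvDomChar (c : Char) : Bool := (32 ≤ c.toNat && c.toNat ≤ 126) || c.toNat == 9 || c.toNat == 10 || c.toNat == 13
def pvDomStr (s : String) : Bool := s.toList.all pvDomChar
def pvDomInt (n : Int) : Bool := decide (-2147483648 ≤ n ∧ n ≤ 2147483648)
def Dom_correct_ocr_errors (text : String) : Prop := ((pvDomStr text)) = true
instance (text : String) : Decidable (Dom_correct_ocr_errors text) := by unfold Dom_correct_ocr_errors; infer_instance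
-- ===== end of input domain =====

-- B replaces A's per-character index-branched loop by explicit slicing into the four
-- positional segments (boundary max 4 (n-4)) each batch-translated with one lookup table
-- (objective: simpler decomposition, same O(n) cost).

-- module-level dicts, shared context of both versions
def dict_char_to_int : PySem.Dict Char Char :=
  PySem.Dict.ofList [('O','0'),('I','1'),('Z','2'),('J','3'),('A','4'),('G','6'),('S','5'),('B','8')]

def dict_int_to_char : PySem.Dict Char Char :=
  PySem.Dict.ofList [('0','O'),('1','I'),('2','Z'),('3','J'),('4','A'),('6','G'),('5','S'),('8','B')]

-- ===== PORT A =====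
-- the loop body of A ('if ch in d: corrected[i] = d[ch]' ported as a match on d.get? ch)
def pvStepA (n : Int) (acc : List Char) (p : Int × Char) : List Char :=
  let i := p.1
  let ch := p.2
  if i < 2 then
    -- state code: both ifs run on the original ch; the second overwrites the first on a hit
    let acc1 := match dict_char_to_int.get? ch with
      | some v => acc.set i.toNat v
      | none => acc
    match dict_int_to_char.get? ch with
    | some v => acc1.set i.toNat v
    | none => acc1
  else if i < 4 then
    match dict_char_to_int.get? ch with
    | some v => acc.set i.toNat v
    | none => acc
  else if i < n - 4 then
    match dict_int_to_char.get? ch with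
    | some v => acc.set i.toNat v
    | none => acc
  else
    match dict_char_to_int.get? ch with
    | some v => acc.set i.toNat v
    | none => acc

def correct_ocr_errors (text : String) : String :=
  let corrected := text.toList
  let n : Int := corrected.length
  String.ofList ((PySem.List.enumerate corrected 0).foldl (pvStepA n) corrected)

-- ===== PORT B =====
-- merged table {**dict_int_to_char, **dict_char_to_int}: keys are disjoint, so entry order
-- does not affect lookup; ported with the int_to_char entries first
def pvStateTable : PySem.Dict Char Char :=
  PySem.Dict.mk (dict_int_to_char.items ++ dict_char_to_int.items)

-- str.translate: one lookup per char, unmapped chars kept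
def pvTranslate (d : PySem.Dict Char Char) (cs : List Char) : List Char :=
  cs.map (fun c => d.getD c c)

def correct_ocr_errors_alt (text : String) : String :=
  let cs := text.toList
  let n := cs.length
  let k := max 4 (n - 4)
  -- text[0:2], text[2:4], text[4:k], text[k:] with 0 ≤ 2 ≤ 4 ≤ k as take/drop slices
  String.ofList (pvTranslate pvStateTable (cs.take 2)
    ++ pvTranslate dict_char_to_int ((cs.drop 2).take 2)
    ++ pvTranslate dict_int_to_char ((cs.drop 4).take (k - 4))
    ++ pvTranslate dict_char_to_int (cs.drop k))

-- ===== PRECONDITION & SPEC =====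
def Spec_correct_ocr_errors (text : String) (out : String) : Prop := out = correct_ocr_errors_alt text
instance (text : String) (out : String) : Decidable (Spec_correct_ocr_errors text out) := by unfold Spec_correct_ocr_errors; infer_instance

-- ===== CLAIM (what is proved, stated in full; the proofs are below) =====
def Claim_equal_correct_ocr_errors : Prop := ∀ (text : String), Dom_correct_ocr_errors text → Spec_correct_ocr_errors text (correct_ocr_errors text)

-- ===== LEMMAS AND PROOFS =====

-- the value A leaves at position i for original char ch (n = len text)
def pvStateVal (ch : Char) : Char :=
  match dict_int_to_char.get? ch with
  | some v => v
  | none => dict_char_to_int.getD ch ch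

def pvF (n i : Int) (ch : Char) : Char :=
  if i < 2 then pvStateVal ch
  else if i < 4 then dict_char_to_int.getD ch ch
  else if i < n - 4 then dict_int_to_char.getD ch ch
  else dict_char_to_int.getD ch ch

-- first-match lookup distributes over append of item lists
theorem pv_get?_mk_append (l1 l2 : List (Char × Char)) (c : Char) :
    (PySem.Dict.mk (l1 ++ l2)).get? c
      = ((PySem.Dict.mk l1).get? c).or ((PySem.Dict.mk l2).get? c) := by
  induction l1 with
  | nil => simp [PySem.Dict.get?]
  | cons p l1 ih =>
    obtain ⟨k, v⟩ := p
    simp only [List.cons_append, PySem.Dict.get?_mk_cons]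
    split_ifs <;> simp [ih]

theorem pv_state_table_getD (ch : Char) : pvStateTable.getD ch ch = pvStateVal ch := by
  rw [PySem.Dict.getD_eq_get?_getD, pvStateTable, pv_get?_mk_append]
  cases h : dict_int_to_char.get? ch with
  | some v => simp [pvStateVal, h]
  | none =>
    simp [pvStateVal, h, PySem.Dict.getD_eq_get?_getD]

theorem pv_set_self (l : List Char) (i : ℕ) (a : Char) (h : l[i]? = some a) :
    l.set i a = l := by
  obtain ⟨hl, -⟩ := List.getElem?_eq_some_iff.mp h
  apply List.ext_getElem?
  intro j
  rw [List.getElem?_set]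
  split_ifs with h1
  · subst h1; exact h.symm
  · rfl

theorem pv_step_set (n : Int) (acc : List Char) (s : ℕ) (ch : Char)
    (h : acc[s]? = some ch) :
    pvStepA n acc ((s : Int), ch) = acc.set s (pvF n s ch) := by
  have hs : ((s : Int)).toNat = s := by simp
  unfold pvStepA pvF
  simp only [hs]
  split_ifs with h1 h2 h3
  · cases h2 : dict_int_to_char.get? ch with
    | some v =>
      simp only [pvStateVal, h2]
      cases dict_char_to_int.get? ch <;> simp [List.set_set]
    | none =>
      cases h3 : dict_char_to_int.get? ch with
      | some v => simp [pvStateVal, h2, h3, PySem.Dict.getD_eq_get?_getD]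
      | none =>
        simp only [pvStateVal, h2, h3, PySem.Dict.getD_eq_get?_getD, Option.getD_none]
        exact (pv_set_self acc s ch h).symm
  · cases hc : dict_char_to_int.get? ch with
    | some v => simp [PySem.Dict.getD_eq_get?_getD, hc]
    | none =>
      simp only [PySem.Dict.getD_eq_get?_getD, hc, Option.getD_none]
      exact (pv_set_self acc s ch h).symm
  · cases hc : dict_int_to_char.get? ch with
    | some v => simp [PySem.Dict.getD_eq_get?_getD, hc]
    | none =>
      simp only [PySem.Dict.getD_eq_get?_getD, hc, Option.getD_none]
      exact (pv_set_self acc s ch h).symm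
  · cases hc : dict_char_to_int.get? ch with
    | some v => simp [PySem.Dict.getD_eq_get?_getD, hc]
    | none =>
      simp only [PySem.Dict.getD_eq_get?_getD, hc, Option.getD_none]
      exact (pv_set_self acc s ch h).symm

theorem pv_take_set_succ (ys : List Char) (s : ℕ) (v : Char) (h : s < ys.length) :
    (ys.set s v).take (s + 1) = ys.take s ++ [v] := by
  rw [List.set_eq_take_append_cons_drop, if_pos h]
  rw [List.take_append]
  have h1 : (ys.take s).length = s := by rw [List.length_take]; omega
  rw [h1, List.take_of_length_le (by omega)]
  simp

theorem pv_drop_set (ys : List Char) (s m : ℕ) (v : Char) (h : s < m) :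
    (ys.set s v).drop m = ys.drop m := by
  apply List.ext_getElem?
  intro j
  rw [List.getElem?_drop, List.getElem?_drop, List.getElem?_set, if_neg (by omega)]

theorem pv_foldl_step (n : Int) :
    ∀ (xs ys : List Char) (s : ℕ),
      s + xs.length ≤ ys.length →
      (∀ k, (hk : k < xs.length) → ys[s + k]? = some xs[k]) →
      (PySem.List.enumerate xs (s : Int)).foldl (pvStepA n) ys
        = ys.take s ++ xs.mapIdx (fun j ch => pvF n ((s + j : ℕ) : Int) ch) ++ ys.drop (s + xs.length) := by
  intro xs
  induction xs with
  | nil =>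
    intro ys s hlen _
    simp [PySem.List.enumerate_nil]
  | cons x xs ih =>
    intro ys s hlen hget
    have hslen : s < ys.length := by simp at hlen; omega
    have h0 : ys[s]? = some x := by simpa using hget 0 (by simp)
    rw [PySem.List.enumerate_cons, List.foldl_cons, pv_step_set n ys s x h0]
    have hcast : (s : Int) + 1 = ((s + 1 : ℕ) : Int) := by push_cast; ring
    rw [hcast]
    rw [ih (ys.set s (pvF n s x)) (s + 1)
      (by rw [List.length_set]; simp at hlen ⊢; omega)
      (by
        intro k hk
        rw [List.getElem?_set, if_neg (by omega)]
        have h' := hget (k + 1) (by simp; omega)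
        have hidx : s + (k + 1) = s + 1 + k := by omega
        rw [hidx] at h'
        simpa using h')]
    rw [pv_take_set_succ ys s _ hslen, pv_drop_set ys s _ _ (by omega)]
    have hfun : (fun (j : ℕ) (ch : Char) => pvF n ((s + 1 + j : ℕ) : Int) ch)
        = fun (j : ℕ) (ch : Char) => pvF n ((s + (j + 1) : ℕ) : Int) ch := by
      funext j ch
      congr 2
      omega
    rw [hfun, List.mapIdx_cons]
    have hdrop : s + 1 + xs.length = s + (x :: xs).length := by simp; omega
    rw [hdrop]
    simp

theorem pv_mapIdx_eq_map (l : List Char) (f : ℕ → Char → Char) (g : Char → Char)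
    (h : ∀ j, (hj : j < l.length) → f j l[j] = g l[j]) :
    l.mapIdx f = l.map g := by
  apply List.ext_getElem <;> simp_all

theorem pv_main (cs : List Char) :
    (PySem.List.enumerate cs 0).foldl (pvStepA (cs.length : Int)) cs
      = pvTranslate pvStateTable (cs.take 2)
        ++ pvTranslate dict_char_to_int ((cs.drop 2).take 2)
        ++ pvTranslate dict_int_to_char ((cs.drop 4).take (max 4 (cs.length - 4) - 4))
        ++ pvTranslate dict_char_to_int (cs.drop (max 4 (cs.length - 4))) := by
  have hA := pv_foldl_step (cs.length : Int) cs cs 0 (by simp) (by intro k hk; simp)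
  norm_num at hA
  rw [hA]
  set n := cs.length with hn
  set k := max 4 (n - 4) with hk
  have t4 : cs.take 2 ++ (cs.drop 2).take 2 = cs.take 4 := by
    rw [show (4 : ℕ) = 2 + 2 from rfl, List.take_add]
  have tk : cs.take 4 ++ (cs.drop 4).take (k - 4) = cs.take k := by
    rw [← List.take_add]
    congr 1
    omega
  have hsplit : cs = cs.take 2 ++ (cs.drop 2).take 2 ++ (cs.drop 4).take (k - 4) ++ cs.drop k := by
    calc cs = cs.take k ++ cs.drop k := (List.take_append_drop k cs).symm
    _ = cs.take 4 ++ (cs.drop 4).take (k - 4) ++ cs.drop k := by rw [tk]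
    _ = cs.take 2 ++ (cs.drop 2).take 2 ++ (cs.drop 4).take (k - 4) ++ cs.drop k := by rw [← t4]
  conv_lhs => rw [hsplit]
  simp only [List.mapIdx_append]
  congr 1
  · congr 1
    · congr 1
      · -- state segment
        simp only [pvTranslate]
        apply pv_mapIdx_eq_map
        intro j hj
        simp only [List.length_take] at hj
        unfold pvF
        rw [if_pos (by omega)]
        exact (pv_state_table_getD _).symm
      · -- district segment
        simp only [pvTranslate]
        apply pv_mapIdx_eq_map
        intro j hj
        simp only [List.length_take, List.length_drop] at hj
        simp only [List.length_take]
        unfold pvF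
        rw [if_neg (by omega), if_pos (by omega)]
    · -- series segment
      simp only [pvTranslate]
      apply pv_mapIdx_eq_map
      intro j hj
      simp only [List.length_take, List.length_drop] at hj
      simp only [List.length_take, List.length_drop, List.length_append]
      unfold pvF
      rw [if_neg (by omega), if_neg (by omega), if_pos (by omega)]
  · -- serial segment
    simp only [pvTranslate]
    apply pv_mapIdx_eq_map
    intro j hj
    simp only [List.length_drop] at hj
    simp only [List.length_take, List.length_drop, List.length_append]
    unfold pvF
    rw [if_neg (by omega), if_neg (by omega), if_neg (by omega)]

-- ===== VERDICT (by name: the statement is the Claim_ definition above) =====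
theorem correct_ocr_errors_spec : Claim_equal_correct_ocr_errors := by
  intro text _
  show correct_ocr_errors text = correct_ocr_errors_alt text
  unfold correct_ocr_errors correct_ocr_errors_alt
  exact congrArg String.ofList (pv_main text.toList)
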